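-- pv_equiv track=rewrite | github.com/kristopher-miles/threadspeak-audiobook | app/script_sanity.py | _find_sentence_right_boundary
-- ===== SOURCE A (Python) =====
-- def _find_sentence_right_boundary(text, index):
--     text = text or ""
--     index = max(0, min(len(text), int(index or 0)))
--     candidates = [pos for pos in (
--         text.find(". ", index),
--         text.find("! ", index),
--         text.find("? ", index),
--         text.find("\n\n", index),
--     ) if pos != -1]
--     if not candidates:
--         return len(text)
--     end = min(candidates)
--     if text[end:end + 2] in (". ", "! ", "? "):
--         return end + 1
--     return end
-- ===== SOURCE B (Python) =====
-- def _find_sentence_right_boundary(text, index):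
--     # Single forward scan instead of four str.find passes + min.
--     text = text or ""
--     i = max(0, min(len(text), int(index or 0)))
--     n = len(text)
--     while i < n - 1:
--         pair = text[i:i + 2]
--         if pair in (". ", "! ", "? "):
--             return i + 1
--         if pair == "\n\n":
--             return i
--         i += 1
--     return n
-- ===== Notes on version B (the rewrite author's own statement) =====
-- stated objective: alternative
-- what changed: Replaces the four str.find scans plus list-filter-and-min with a single forward while-loop that inspects the two-char window at each position and returns at the first match (+1 for '. '/'! '/'? ', the position itself for '\n\n').
import Mathlib
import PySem

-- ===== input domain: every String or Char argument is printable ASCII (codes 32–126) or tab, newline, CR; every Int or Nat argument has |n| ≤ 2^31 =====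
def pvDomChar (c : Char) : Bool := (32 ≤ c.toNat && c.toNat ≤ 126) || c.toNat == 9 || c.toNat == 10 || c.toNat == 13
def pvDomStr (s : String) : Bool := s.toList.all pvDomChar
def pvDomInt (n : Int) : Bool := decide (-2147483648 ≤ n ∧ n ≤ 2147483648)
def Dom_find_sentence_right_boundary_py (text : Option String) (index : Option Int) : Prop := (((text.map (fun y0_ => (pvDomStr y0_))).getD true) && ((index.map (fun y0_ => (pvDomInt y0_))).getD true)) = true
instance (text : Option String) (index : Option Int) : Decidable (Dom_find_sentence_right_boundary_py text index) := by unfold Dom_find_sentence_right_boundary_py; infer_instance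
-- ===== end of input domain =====

-- B replaces A's four str.find scans + filter + min with one forward scan over the text
-- (alternative decomposition, same asymptotic cost); both are total, A = B everywhere.

-- ===== PORT A =====
-- `text or ""` = Option.getD "" and `int(index or 0)` = Option.getD 0 (the falsy values "" and 0
-- are their own fallbacks, so the Option default is exact).
def find_sentence_right_boundary_py (text : Option String) (index : Option Int) : Int :=
  let t := text.getD ""
  let n : Int := PySem.Str.len t
  let idx : Int := max 0 (min n (index.getD 0))
  let candidates := ([PySem.Str.findFrom t ". " idx,
                      PySem.Str.findFrom t "! " idx,
                      PySem.Str.findFrom t "? " idx,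
                      PySem.Str.findFrom t "\n\n" idx]).filter (fun p => p != -1)
  if candidates.isEmpty then n
  else
    match PySem.List.min? candidates id with
    | none => 0  -- unreachable: candidates is nonempty here
    | some e =>
      if [". ", "! ", "? "].contains (PySem.Str.slice t (some e) (some (e + 2))) then e + 1
      else e

-- ===== PORT B =====
-- the while-loop of Source B: walk the remaining characters, keeping the current index i
def pvScanB : List Char → Int → Int → Int
  | a :: b :: rest, i, n =>
    if [['.', ' '], ['!', ' '], ['?', ' ']].contains [a, b] then i + 1
    else if [a, b] = [('\n' : Char), '\n'] then i
    else pvScanB (b :: rest) (i + 1) n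
  | _, _, n => n

def find_sentence_right_boundary_py_alt (text : Option String) (index : Option Int) : Int :=
  let t := text.getD ""
  let n : Int := PySem.Str.len t
  let i : Int := max 0 (min n (index.getD 0))
  pvScanB (t.toList.drop i.toNat) i n

-- ===== PRECONDITION & SPEC =====
def Spec_find_sentence_right_boundary_py (text : Option String) (index : Option Int) (out : Int) : Prop := out = find_sentence_right_boundary_py_alt text index
instance (text : Option String) (index : Option Int) (out : Int) : Decidable (Spec_find_sentence_right_boundary_py text index out) := by unfold Spec_find_sentence_right_boundary_py; infer_instance

-- ===== CLAIM (what is proved, stated in full; the proofs are below) =====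
def Claim_equal_find_sentence_right_boundary_py : Prop := ∀ (text : Option String) (index : Option Int), Dom_find_sentence_right_boundary_py text index → Spec_find_sentence_right_boundary_py text index (find_sentence_right_boundary_py text index)

-- ===== LEMMAS AND PROOFS =====

-- the three sentence-punctuation pairs, as char lists
def pvPats3 : List (List Char) := [['.', ' '], ['!', ' '], ['?', ' ']]

-- one candidate of A, reduced to `find` on the tail t = s.drop k
def pvCand (t : List Char) (k : Nat) (p : List Char) : Int :=
  if PySem.Chars.find t p = -1 then -1 else (k : Int) + PySem.Chars.find t p

def pvCands (t : List Char) (k : Nat) : List Int :=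
  ([pvCand t k ['.', ' '], pvCand t k ['!', ' '],
    pvCand t k ['?', ' '], pvCand t k [('\n' : Char), '\n']]).filter (fun p => p != -1)

-- A's tail computation, phrased on the suffix t = s.drop k
def pvAcore (t : List Char) (k : Nat) (n : Int) : Int :=
  if (pvCands t k).isEmpty then n
  else
    match PySem.List.min? (pvCands t k) id with
    | none => 0
    | some e =>
      if pvPats3.contains ((t.drop (e - (k : Int)).toNat).take 2) then e + 1 else e

-- characterisation of find, from the PySem spec lemmas
theorem pv_find_neg_iff (t p : List Char) :
    PySem.Chars.find t p = -1 ↔ ¬ p <:+: t := by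
  have h := PySem.Chars.findFrom_natCast_eq_neg_one_iff t p 0 (Nat.zero_le _)
  simpa [PySem.Chars.findFrom_zero] using h

theorem pv_find_spec (t p : List Char) (h : PySem.Chars.find t p ≠ -1) :
    0 ≤ PySem.Chars.find t p ∧ p <+: t.drop (PySem.Chars.find t p).toNat ∧
      ∀ i, i < (PySem.Chars.find t p).toNat → ¬ p <+: t.drop i := by
  have hs := PySem.Chars.findFrom_natCast_spec t p 0 (Nat.zero_le _)
  rw [Nat.cast_zero, PySem.Chars.findFrom_zero] at hs
  obtain ⟨h0, hpre, hmin⟩ := hs h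
  exact ⟨h0, hpre, fun i hi => hmin i (Nat.zero_le _) hi⟩

theorem pv_find_short (t p : List Char) (h : t.length < p.length) :
    PySem.Chars.find t p = -1 := by
  rw [pv_find_neg_iff]
  intro hinf
  exact absurd hinf.length_le (by omega)

theorem pv_find_cons_pos (a : Char) (t' p : List Char) (h : p <+: a :: t') :
    PySem.Chars.find (a :: t') p = 0 := by
  have hne : PySem.Chars.find (a :: t') p ≠ -1 := by
    rw [ne_eq, pv_find_neg_iff, not_not]; exact h.isInfix
  obtain ⟨h0, _, hmin⟩ := pv_find_spec _ _ hne
  by_cases hz : (PySem.Chars.find (a :: t') p).toNat = 0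
  · omega
  · exact absurd (by simpa using h) (hmin 0 (by omega))

theorem pv_find_cons_neg (a : Char) (t' p : List Char) (h : ¬ p <+: a :: t') :
    PySem.Chars.find (a :: t') p =
      if PySem.Chars.find t' p = -1 then -1 else PySem.Chars.find t' p + 1 := by
  split_ifs with h1
  · rw [pv_find_neg_iff] at h1 ⊢
    intro hinf
    rcases List.infix_cons_iff.mp hinf with hp | hi
    · exact h hp
    · exact h1 hi
  · -- the needle occurs in t' at position m := find t' p; show find (a::t') = m + 1
    obtain ⟨hm0, hmpre, hmmin⟩ := pv_find_spec t' p h1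
    have hinf : p <:+: a :: t' :=
      List.infix_cons_iff.mpr (Or.inr (hmpre.isInfix.trans (List.drop_suffix _ _).isInfix))
    have hne : PySem.Chars.find (a :: t') p ≠ -1 := by
      rw [ne_eq, pv_find_neg_iff, not_not]; exact hinf
    obtain ⟨hr0, hrpre, hrmin⟩ := pv_find_spec (a :: t') p hne
    set r := PySem.Chars.find (a :: t') p with hr
    have hrz : r.toNat ≠ 0 := by
      intro hz; rw [hz] at hrpre; exact h (by simpa using hrpre)
    obtain ⟨j, hj⟩ : ∃ j, r.toNat = j + 1 := ⟨r.toNat - 1, by omega⟩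
    have hrpre' : p <+: t'.drop j := by
      have hx := hrpre
      rw [hj, List.drop_succ_cons] at hx
      exact hx
    have h1le : (PySem.Chars.find t' p).toNat ≤ j := by
      by_contra hlt
      exact hmmin _ (by omega) hrpre'
    have h2le : j ≤ (PySem.Chars.find t' p).toNat := by
      by_contra hlt
      have hx : ¬ p <+: (a :: t').drop ((PySem.Chars.find t' p).toNat + 1) :=
        hrmin _ (by omega)
      rw [List.drop_succ_cons] at hx
      exact hx hmpre
    omega

-- min? with the identity key returns the minimum value when one is exhibited
theorem pv_pymin_some (l : List Int) (m : Int) (hmem : m ∈ l) (hlb : ∀ x ∈ l, m ≤ x) :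
    PySem.List.min? l id = some m := by
  rcases hm : PySem.List.min? l id with _ | e
  · rw [PySem.List.min?_eq_none_iff] at hm
    subst hm
    simp at hmem
  · have he := PySem.List.min?_mem hm
    have h1 : (id e : Int) ≤ id m := PySem.List.min?_isMin hm m hmem
    simp only [id] at h1
    have h2 := hlb e he
    have he2 : e = m := le_antisymm h1 h2
    rw [he2]

-- every candidate is ≥ k
theorem pv_cands_lb (t : List Char) (k : Nat) :
    ∀ x ∈ pvCands t k, (k : Int) ≤ x := by
  intro x hx
  simp only [pvCands, List.mem_filter, List.mem_cons, List.not_mem_nil, or_false,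
    bne_iff_ne, ne_eq] at hx
  obtain ⟨hmem, hne⟩ := hx
  have hstep : ∀ p, x = pvCand t k p → (k : Int) ≤ x := by
    intro p hp
    rw [pvCand] at hp
    split_ifs at hp with hf
    · exact absurd hp hne
    · have := (pv_find_spec t p hf).1
      omega
  rcases hmem with h | h | h | h
  all_goals exact hstep _ h

-- a matched pair at position 0 puts k into the candidates and makes it the minimum
theorem pv_min_of_prefix (t : List Char) (k : Nat) (p : List Char)
    (hp : p ∈ [['.', ' '], ['!', ' '], ['?', ' '], [('\n' : Char), '\n']])
    (hf : PySem.Chars.find t p = 0) :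
    PySem.List.min? (pvCands t k) id = some (k : Int) := by
  apply pv_pymin_some
  · have hc : pvCand t k p = (k : Int) := by
      rw [pvCand, hf]; simp
    simp only [pvCands, List.mem_filter]
    constructor
    · fin_cases hp <;> simp [← hc]
    · simp
  · exact pv_cands_lb t k

theorem pv_cands_nonempty_of_prefix (t : List Char) (k : Nat) (p : List Char)
    (hp : p ∈ [['.', ' '], ['!', ' '], ['?', ' '], [('\n' : Char), '\n']])
    (hf : PySem.Chars.find t p = 0) :
    (pvCands t k).isEmpty = false := by
  have hc : pvCand t k p = (k : Int) := by rw [pvCand, hf]; simp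
  rw [List.isEmpty_eq_false_iff_exists_mem]
  refine ⟨(k : Int), ?_⟩
  simp only [pvCands, List.mem_filter]
  constructor
  · fin_cases hp <;> simp [← hc]
  · simp

-- shifting one unmatched character off the front
theorem pv_cand_shift (a : Char) (t' p : List Char) (k : Nat) (h : ¬ p <+: a :: t') :
    pvCand (a :: t') k p = pvCand t' (k + 1) p := by
  rw [pvCand, pvCand, pv_find_cons_neg a t' p h]
  by_cases hf : PySem.Chars.find t' p = -1
  · simp [hf]
  · have h0 := (pv_find_spec t' p hf).1
    have hne : PySem.Chars.find t' p + 1 ≠ -1 := by omega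
    simp only [hf, if_neg hne, if_false]
    push_cast
    ring

theorem pv_two_prefix (x y a b : Char) (t : List Char) :
    [x, y] <+: a :: b :: t ↔ x = a ∧ y = b := by
  constructor
  · intro h
    rcases List.cons_prefix_cons.mp h with ⟨hx, h2⟩
    rcases List.cons_prefix_cons.mp h2 with ⟨hy, _⟩
    exact ⟨hx, hy⟩
  · rintro ⟨rfl, rfl⟩
    exact ⟨t, rfl⟩

-- MAIN: the single scan equals A's candidates-and-minimum computation
theorem pv_main (t : List Char) : ∀ (k : Nat) (n : Int),
    pvScanB t (k : Int) n = pvAcore t k n := by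
  induction t with
  | nil =>
    intro k n
    have h1 := pv_find_short [] ['.', ' '] (by simp)
    have h2 := pv_find_short [] ['!', ' '] (by simp)
    have h3 := pv_find_short [] ['?', ' '] (by simp)
    have h4 := pv_find_short [] [('\n' : Char), '\n'] (by simp)
    simp [pvScanB, pvAcore, pvCands, pvCand, h1, h2, h3, h4]
  | cons a t ih =>
    cases t with
    | nil =>
      intro k n
      have h1 := pv_find_short [a] ['.', ' '] (by simp)
      have h2 := pv_find_short [a] ['!', ' '] (by simp)
      have h3 := pv_find_short [a] ['?', ' '] (by simp)
      have h4 := pv_find_short [a] [('\n' : Char), '\n'] (by simp)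
      simp [pvScanB, pvAcore, pvCands, pvCand, h1, h2, h3, h4]
    | cons b rest =>
      intro k n
      by_cases hpat : [['.', ' '], ['!', ' '], ['?', ' ']].contains [a, b]
      · -- a punctuation pair matches at the current position
        have hp : [a, b] ∈ [['.', ' '], ['!', ' '], ['?', ' '], [('\n' : Char), '\n']] := by
          simp only [List.contains_eq_mem, decide_eq_true_eq] at hpat
          simp only [List.mem_cons] at hpat ⊢
          tauto
        have hf : PySem.Chars.find (a :: b :: rest) [a, b] = 0 :=
          pv_find_cons_pos _ _ _ ((pv_two_prefix a b a b rest).mpr ⟨rfl, rfl⟩)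
        rw [pvAcore, if_neg (by rw [pv_cands_nonempty_of_prefix _ k _ hp hf]; simp),
          pv_min_of_prefix _ k _ hp hf]
        have hdrop : (((a :: b :: rest).drop (((k : Int) - (k : Int)).toNat)).take 2) = [a, b] := by
          simp
        show pvScanB (a :: b :: rest) ((k : Int)) n =
          if pvPats3.contains ((((a :: b :: rest).drop (((k : Int) - (k : Int)).toNat)).take 2)) = true
          then (k : Int) + 1 else (k : Int)
        rw [hdrop]
        have hcont : pvPats3.contains [a, b] = true := hpat
        rw [pvScanB, if_pos hpat, hcont, if_pos rfl]
      · by_cases hnl : [a, b] = [('\n' : Char), '\n']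
        · -- a blank-line pair matches at the current position
          have hab : a = '\n' ∧ b = '\n' := by
            simpa using hnl
          obtain ⟨rfl, rfl⟩ := hab
          have hp : [('\n' : Char), '\n'] ∈
              [['.', ' '], ['!', ' '], ['?', ' '], [('\n' : Char), '\n']] := by simp
          have hf : PySem.Chars.find ('\n' :: '\n' :: rest) [('\n' : Char), '\n'] = 0 :=
            pv_find_cons_pos _ _ _ ((pv_two_prefix _ _ _ _ rest).mpr ⟨rfl, rfl⟩)
          rw [pvAcore, if_neg (by rw [pv_cands_nonempty_of_prefix _ k _ hp hf]; simp),
            pv_min_of_prefix _ k _ hp hf]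
          have hdrop : ((('\n' :: '\n' :: rest).drop (((k : Int) - (k : Int)).toNat)).take 2)
              = [('\n' : Char), '\n'] := by simp
          show pvScanB ('\n' :: '\n' :: rest) ((k : Int)) n =
            if pvPats3.contains (((('\n' :: '\n' :: rest).drop (((k : Int) - (k : Int)).toNat)).take 2)) = true
            then (k : Int) + 1 else (k : Int)
          rw [hdrop]
          have hcont : pvPats3.contains [('\n' : Char), '\n'] = false := by decide
          rw [pvScanB, if_neg (by decide), if_pos rfl, hcont]
          simp
        · -- no pair matches here: both sides step to the tail with k + 1
          have hnopre : ∀ p ∈ [['.', ' '], ['!', ' '], ['?', ' '], [('\n' : Char), '\n']],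
              ¬ p <+: a :: b :: rest := by
            intro p hp hpre
            simp only [List.contains_eq_mem, decide_eq_true_eq, List.mem_cons,
              List.not_mem_nil, or_false] at hpat hp
            rcases hp with rfl | rfl | rfl | rfl
            · exact hpat (Or.inl (by
                rcases (pv_two_prefix _ _ _ _ rest).mp hpre with ⟨h1, h2⟩; simp [← h1, ← h2]))
            · exact hpat (Or.inr (Or.inl (by
                rcases (pv_two_prefix _ _ _ _ rest).mp hpre with ⟨h1, h2⟩; simp [← h1, ← h2]))) 
            · exact hpat (Or.inr (Or.inr (by
                rcases (pv_two_prefix _ _ _ _ rest).mp hpre with ⟨h1, h2⟩; simp [← h1, ← h2])))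
            · exact hnl (by
                rcases (pv_two_prefix _ _ _ _ rest).mp hpre with ⟨h1, h2⟩; simp [← h1, ← h2])
          have hcs : pvCands (a :: b :: rest) k = pvCands (b :: rest) (k + 1) := by
            simp only [pvCands]
            rw [pv_cand_shift a _ _ k (hnopre _ (by simp)),
              pv_cand_shift a _ _ k (hnopre _ (by simp)),
              pv_cand_shift a _ _ k (hnopre _ (by simp)),
              pv_cand_shift a _ _ k (hnopre _ (by simp))]
          have hstep : pvScanB (a :: b :: rest) (k : Int) n
              = pvScanB (b :: rest) ((k : Int) + 1) n := by
            rw [pvScanB, if_neg (by simpa using hpat), if_neg hnl]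
          rw [hstep]
          have : ((k : Int) + 1) = ((k + 1 : Nat) : Int) := by push_cast; ring
          rw [this, ih (k + 1) n]
          -- both pvAcore's agree
          rw [pvAcore, pvAcore, hcs]
          rcases hmin : PySem.List.min? (pvCands (b :: rest) (k + 1)) id with _ | e
          · rfl
          · have he : ((k : Int) + 1) ≤ e := by
              have hlb := pv_cands_lb (b :: rest) (k + 1) e (PySem.List.min?_mem hmin)
              push_cast at hlb
              omega
            have hdrop : (a :: b :: rest).drop (e - (k : Int)).toNat
                = (b :: rest).drop (e - ((k + 1 : Nat) : Int)).toNat := by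
              have h1 : (e - (k : Int)).toNat = (e - ((k + 1 : Nat) : Int)).toNat + 1 := by
                push_cast
                omega
              rw [h1, List.drop_succ_cons]
            congr 1
            show (if pvPats3.contains (((b :: rest).drop ((e - ((k + 1 : Nat) : Int)).toNat)).take 2) = true
                then e + 1 else e)
              = (if pvPats3.contains (((a :: b :: rest).drop ((e - (k : Int)).toNat)).take 2) = true
                then e + 1 else e)
            rw [hdrop]

-- string-level membership test reduces to the char-list one
theorem pv_contains_str (x : String) :
    [". ", "! ", "? "].contains x = pvPats3.contains x.toList := by
  simp only [List.contains_eq_mem, pvPats3, List.mem_cons, List.not_mem_nil, or_false,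
    decide_eq_decide]
  constructor
  · rintro (rfl | rfl | rfl) <;> simp
  · intro h
    rcases h with h | h | h
    · exact Or.inl (String.ext_iff.mpr (by rw [h]; rfl))
    · exact Or.inr (Or.inl (String.ext_iff.mpr (by rw [h]; rfl)))
    · exact Or.inr (Or.inr (String.ext_iff.mpr (by rw [h]; rfl)))

-- ===== VERDICT (by name: the statement is the Claim_ definition above) =====
theorem find_sentence_right_boundary_py_spec : Claim_equal_find_sentence_right_boundary_py := by
  intro text index _
  unfold Spec_find_sentence_right_boundary_py
  unfold find_sentence_right_boundary_py find_sentence_right_boundary_py_alt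
  simp only []
  set t := text.getD "" with ht
  set s := t.toList with hs
  have hlen : PySem.Str.len t = (s.length : Int) := by
    simp [PySem.Str.len, hs]
  set idx : Int := max 0 (min (PySem.Str.len t) (index.getD 0)) with hidx
  have h0 : 0 ≤ idx := le_max_left _ _
  have hle : idx ≤ (s.length : Int) := by
    rw [hidx, hlen]
    have : (0 : Int) ≤ (s.length : Int) := by positivity
    omega
  set k := idx.toNat with hk
  have hki : (k : Int) = idx := Int.toNat_of_nonneg h0
  have hkle : k ≤ s.length := by omega
  -- reduce port A's findFrom candidates to pvCand on the suffix s.drop k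
  have hfind : ∀ sub : String, PySem.Str.findFrom t sub idx = pvCand (s.drop k) k sub.toList := by
    intro sub
    rw [PySem.Str.findFrom_eq, ← hki, ← hs, PySem.Chars.findFrom_natCast s sub.toList k hkle]
    rfl
  rw [hfind ". ", hfind "! ", hfind "? ", hfind "\n\n"]
  have hsub1 : (". " : String).toList = ['.', ' '] := rfl
  have hsub2 : ("! " : String).toList = ['!', ' '] := rfl
  have hsub3 : ("? " : String).toList = ['?', ' '] := rfl
  have hsub4 : ("\n\n" : String).toList = [('\n' : Char), '\n'] := rfl
  rw [hsub1, hsub2, hsub3, hsub4]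
  -- port B is pvScanB on the same suffix
  rw [← hki, pv_main (s.drop k) k (PySem.Str.len t)]
  -- it remains to identify port A's tail with pvAcore
  rw [pvAcore]
  show (if (pvCands (s.drop k) k).isEmpty = true then PySem.Str.len t
    else match PySem.List.min? (pvCands (s.drop k) k) id with
      | none => 0
      | some e =>
        if [". ", "! ", "? "].contains (PySem.Str.slice t (some e) (some (e + 2))) = true
        then e + 1 else e) = _
  rcases hEmp : (pvCands (s.drop k) k).isEmpty with _ | _
  · simp only [if_false, Bool.false_eq_true]
    rcases hmin : PySem.List.min? (pvCands (s.drop k) k) id with _ | e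
    · rfl
    · have heMem : e ∈ pvCands (s.drop k) k := by
        exact PySem.List.min?_mem hmin
      have hke : (k : Int) ≤ e := pv_cands_lb _ _ e heMem
      have hslice : (PySem.Str.slice t (some e) (some (e + 2))).toList
          = ((s.drop k).drop (e - (k : Int)).toNat).take 2 := by
        rw [PySem.Str.toList_slice, PySem.Chars.slice_eq_listSlice, ← hs,
          PySem.List.slice_toNat s (a := e) (b := e + 2) (by omega) (by omega)]
        have h2 : (e + 2).toNat - e.toNat = 2 := by omega
        have h3 : e.toNat = k + (e - (k : Int)).toNat := by omega
        rw [h2, h3, ← List.drop_drop]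
      show (if [". ", "! ", "? "].contains (PySem.Str.slice t (some e) (some (e + 2))) = true
            then e + 1 else e)
        = (if pvPats3.contains (((s.drop k).drop ((e - (k : Int)).toNat)).take 2) = true
            then e + 1 else e)
      rw [pv_contains_str, hslice]
  · simp
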